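-- pv_equiv track=rewrite | github.com/paderevski/kivy_capture | nikon.py | get_prev_in_list
-- ===== SOURCE A (Python) =====
-- def get_prev_in_list(the_list, item):
--     v = list(the_list)
--     while (v.pop() != item):
--         pass
--     if len(v) > 0:
--         return v.pop()
--     else:
--         return item
-- ===== SOURCE B (Python) =====
-- def get_prev_in_list(the_list, item):
--     lst = list(the_list)
--     positions = [i for i, x in enumerate(lst) if x == item]
--     last = positions[-1]
--     return item if last == 0 else lst[last - 1]
-- ===== Notes on version B (the rewrite author's own statement) =====
-- stated objective: simpler
-- what changed: Replaces the destructive pop-from-the-end while-loop with one forward enumerate pass collecting the positions of item; returns lst[last-1] for the last position (or item when it is 0), preserving IndexError via positions[-1] when item is absent.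
import Mathlib
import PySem

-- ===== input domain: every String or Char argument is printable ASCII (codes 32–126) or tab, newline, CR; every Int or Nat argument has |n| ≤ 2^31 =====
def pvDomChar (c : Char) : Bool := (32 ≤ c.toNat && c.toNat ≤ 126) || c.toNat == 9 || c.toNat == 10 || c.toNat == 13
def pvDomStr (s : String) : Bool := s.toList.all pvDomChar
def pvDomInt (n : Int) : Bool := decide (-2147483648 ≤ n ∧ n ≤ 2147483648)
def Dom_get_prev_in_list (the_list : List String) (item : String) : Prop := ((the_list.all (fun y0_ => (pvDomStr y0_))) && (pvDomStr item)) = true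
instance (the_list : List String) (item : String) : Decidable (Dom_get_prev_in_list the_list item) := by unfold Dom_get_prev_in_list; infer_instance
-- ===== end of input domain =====

-- B replaces A's destructive pop-from-the-end while-loop by a single forward
-- enumerate pass collecting the positions of item (objective: simpler).
-- Pre_ excludes inputs where A raises IndexError (item absent from the list).

-- ===== PORT A =====
-- the `while (v.pop() != item): pass` loop; none = IndexError (pop from empty list)
def pvALoop (v : List String) (item : String) : Option (List String) :=
  match h : PySem.List.pop? v with
  | none => none
  | some (x, rest) =>
    if x ≠ item then pvALoop rest item else some rest
termination_by v.length
decreasing_by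
  have := PySem.List.length_of_pop?_eq_some v h
  simp at this; omega

def get_prev_in_list (the_list : List String) (item : String) : String :=
  match pvALoop the_list item with
  | none => ""          -- IndexError: excluded by Pre_
  | some v =>
    if v.length > 0 then
      match PySem.List.pop? v with
      | some (x, _) => x
      | none => ""      -- unreachable: v is nonempty here
    else item

-- ===== PORT B =====
def get_prev_in_list_alt (the_list : List String) (item : String) : String :=
  let lst := the_list
  let positions := ((PySem.List.enumerate lst).filter (fun p => p.2 == item)).map (fun p => p.1)
  match PySem.List.pyGet? positions (-1) with
  | none => ""          -- IndexError: positions empty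
  | some last => if last == 0 then item else (PySem.List.pyGet? lst (last - 1)).getD ""

-- ===== PRECONDITION & SPEC =====
-- A (and B) raise IndexError exactly when item does not occur in the list.
def Pre_get_prev_in_list (the_list : List String) (item : String) : Prop := item ∈ the_list
instance (the_list : List String) (item : String) : Decidable (Pre_get_prev_in_list the_list item) := by unfold Pre_get_prev_in_list; infer_instance

def pvWitness_get_prev_in_list : List String × String := (["a", "b", "a", "c"], "a")

def Spec_get_prev_in_list (the_list : List String) (item : String) (out : String) : Prop := out = get_prev_in_list_alt the_list item
instance (the_list : List String) (item : String) (out : String) : Decidable (Spec_get_prev_in_list the_list item out) := by unfold Spec_get_prev_in_list; infer_instance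

-- ===== CLAIM (what is proved, stated in full; the proofs are below) =====
def Claim_equal_get_prev_in_list : Prop := ∀ (the_list : List String) (item : String), Dom_get_prev_in_list the_list item → Pre_get_prev_in_list the_list item → Spec_get_prev_in_list the_list item (get_prev_in_list the_list item)

-- ===== LEMMAS AND PROOFS =====

def pvPos (xs : List String) (item : String) : List Int :=
  ((PySem.List.enumerate xs).filter (fun p => p.2 == item)).map (fun p => p.1)

lemma pvPos_append (xs : List String) (x item : String) :
    pvPos (xs ++ [x]) item = pvPos xs item ++ (if x == item then [(xs.length : Int)] else []) := by
  simp only [pvPos, PySem.List.enumerate_append, List.filter_append, List.map_append]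
  congr 1
  simp [PySem.List.enumerate]
  split_ifs <;> simp_all

lemma pvPos_bound (xs : List String) (item : String) (i : Int) (h : i ∈ pvPos xs item) :
    0 ≤ i ∧ i < xs.length := by
  simp only [pvPos, List.mem_map, List.mem_filter] at h
  obtain ⟨p, ⟨hp, _⟩, rfl⟩ := h
  rw [PySem.List.mem_enumerate_iff] at hp
  obtain ⟨k, hk, rfl⟩ := hp
  omega

lemma alt_of_pos (xs : List String) (item : String) :
    get_prev_in_list_alt xs item =
      (match (pvPos xs item).getLast? with
       | none => ""
       | some last => if last == 0 then item else (PySem.List.pyGet? xs (last - 1)).getD "") := by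
  simp only [get_prev_in_list_alt, PySem.List.pyGet?_neg_one, pvPos]

lemma pvALoop_append (xs : List String) (x item : String) :
    pvALoop (xs ++ [x]) item = if x ≠ item then pvALoop xs item else some xs := by
  rw [pvALoop]
  split
  next heq => rw [PySem.List.pop?_last] at heq; exact absurd heq (by simp)
  next heq =>
    rename_i a b
    rw [PySem.List.pop?_last] at heq
    obtain ⟨rfl, rfl⟩ : x = a ∧ xs = b := by simpa using heq
    rfl

lemma main_eq (item : String) (xs : List String) (hmem : item ∈ xs) :
    get_prev_in_list xs item = get_prev_in_list_alt xs item := by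
  induction xs using List.reverseRecOn with
  | nil => simp at hmem
  | append_singleton ys y ih =>
    rw [alt_of_pos, pvPos_append]
    by_cases hy : y = item
    · -- last popped element is the item: loop stops with v = ys
      subst hy
      simp only [get_prev_in_list, pvALoop_append, ne_eq, not_true_eq_false, if_false,
        beq_self_eq_true, if_true, List.getLast?_concat]
      rcases ys.eq_nil_or_concat with rfl | ⟨zs, z, rfl⟩
      · simp
      · simp only [List.concat_eq_append]
        have hlen : (((zs ++ [z]).length : Nat) : Int) - 1 = ((zs.length : Nat) : Int) := by
          simp
        rw [if_pos (by simp), if_neg (by simp; omega), hlen, PySem.List.pyGet?_natCast,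
            List.append_assoc, List.getElem?_append_right (by omega)]
        simp [PySem.List.pop?_last]
    · -- y is not the item: both sides ignore the last element
      have hmem' : item ∈ ys := by
        rcases List.mem_append.mp hmem with h | h
        · exact h
        · simp at h; exact absurd h.symm hy
      have hby : (y == item) = false := by simpa using hy
      rw [hby]
      simp only [Bool.false_eq_true, if_false, List.append_nil]
      -- A side: the loop skips y
      have hA : get_prev_in_list (ys ++ [y]) item = get_prev_in_list ys item := by
        simp only [get_prev_in_list, pvALoop_append, ne_eq, hy, not_false_eq_true, if_true]
      rw [hA, ih hmem', alt_of_pos]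
      -- B side: show the two matches agree
      cases hlast : (pvPos ys item).getLast? with
      | none => rfl
      | some last =>
        have hmemp : last ∈ pvPos ys item := List.mem_of_getLast? hlast
        have hbd := pvPos_bound ys item last hmemp
        by_cases h0 : last = 0
        · simp [h0]
        · have hb : (last == 0) = false := by simpa using h0
          have h1 : (0:Int) ≤ last - 1 := by omega
          have h2 : (last - 1).toNat < ys.length := by omega
          simp only [hb, Bool.false_eq_true, if_false]
          rw [PySem.List.pyGet?_of_nonneg _ h1, PySem.List.pyGet?_of_nonneg _ h1,
              List.getElem?_append_left h2]

-- ===== VERDICT (by name: the statement is the Claim_ definition above) =====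
theorem get_prev_in_list_spec : Claim_equal_get_prev_in_list := by
  intro the_list item _ hpre
  exact main_eq item the_list hpre
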